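-- pv_equiv track=rewrite | github.com/thotalakshmimounika/IntermediateDSA | Scaler Contests/Contest 3/Maximum Sum in Bag.py | solve
-- ===== SOURCE A (Python) =====
-- def solve(a,b,c):
--     n=len(a)
--     pf=[0]*n
--     pf[0]=a[0]
--     for i in range(1,n):
--         pf[i]=pf[i-1]+a[i]
--     pf1=[0]*n
--     if b[0]==1:
--         pf1[0]=a[0]
--     for i in range(1,n):
--         if b[i]==1:
--             pf1[i]=pf1[i-1]+a[i]
--         else:
--             pf1[i]=pf1[i-1]
--
--     s,e=0,c-1
--     ans=0
--     while(e<n):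
--         ta=0
--         if s==0:
--             ta+=pf[e]
--         else:
--             ta+=pf[e]-pf[s-1]
--         if s==0:
--             ta+=pf1[n-1]-pf1[e]
--         else:
--             ta+=pf1[s-1]
--             ta+=pf1[n-1]-pf1[e]
--         ans=max(ans,ta)
--         s+=1
--         e+=1
--     return ans
-- ===== SOURCE B (Python) =====
-- def solve(a, b, c):
--     n = len(a)
--     cond_total = 0
--     for i in range(n):
--         if b[i] == 1:
--             cond_total += a[i]
--     if c > n:
--         return 0
--     ws = 0
--     wc = 0
--     for i in range(c):
--         ws += a[i]
--         if b[i] == 1: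
--             wc += a[i]
--     ans = max(0, ws + cond_total - wc)
--     for s in range(1, n - c + 1):
--         e = s + c - 1
--         ws += a[e] - a[s - 1]
--         if b[e] == 1:
--             wc += a[e]
--         if b[s - 1] == 1:
--             wc -= a[s - 1]
--         ans = max(ans, ws + cond_total - wc)
--     return ans
-- ===== Notes on version B (the rewrite author's own statement) =====
-- stated objective: alternative
-- what changed: B drops A's two prefix-sum arrays entirely and instead makes one pass for the conditional total plus a sliding window that maintains the window sum and the conditional window sum incrementally.
-- intended difference: For c = 0 (an empty window) A's pf[-1] wraparound adds the whole-array sum as a candidate, so A returns max(0, sum(a), conditional sum) while B returns the intended empty-window value max(0, conditional sum); they differ exactly when sum(a) is positive and exceeds that maximum. — e.g. on solve([3, -1], [0, 0], 0): A returns 2, B returns 0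
import Mathlib
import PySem

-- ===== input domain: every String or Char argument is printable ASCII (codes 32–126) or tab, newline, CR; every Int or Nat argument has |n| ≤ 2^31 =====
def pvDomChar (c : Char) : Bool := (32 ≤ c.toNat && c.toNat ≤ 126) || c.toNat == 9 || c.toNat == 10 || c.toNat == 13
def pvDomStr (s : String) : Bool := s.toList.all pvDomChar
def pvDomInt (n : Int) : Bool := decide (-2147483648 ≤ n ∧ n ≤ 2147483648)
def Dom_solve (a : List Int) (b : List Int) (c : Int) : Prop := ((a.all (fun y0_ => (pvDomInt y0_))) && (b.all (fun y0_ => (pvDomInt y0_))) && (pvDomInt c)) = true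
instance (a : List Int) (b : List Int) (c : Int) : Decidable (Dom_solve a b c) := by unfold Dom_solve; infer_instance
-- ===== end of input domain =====

-- B replaces A's two prefix-sum arrays by a single sliding window carrying the window sum and the
-- conditional window sum (objective: alternative decomposition, same O(n) cost).

-- ===== PORT A =====
-- pf[i] = pf[i-1] + a[i] loop
def pfStep (a : List Int) (pf : List Int) (i : Int) : List Int :=
  PySem.List.pySetD pf i (PySem.List.pyGetD pf (i-1) 0 + PySem.List.pyGetD a i 0)

def buildPf (a : List Int) (n : Int) : List Int :=
  (PySem.List.pyRange 1 n 1).foldl (pfStep a)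
    (PySem.List.pySetD (List.replicate n.toNat (0:Int)) 0 (PySem.List.pyGetD a 0 0))

-- pf1[i] = pf1[i-1] (+ a[i] if b[i]==1) loop
def pf1Step (a b : List Int) (pf1 : List Int) (i : Int) : List Int :=
  if PySem.List.pyGetD b i 0 = 1 then
    PySem.List.pySetD pf1 i (PySem.List.pyGetD pf1 (i-1) 0 + PySem.List.pyGetD a i 0)
  else
    PySem.List.pySetD pf1 i (PySem.List.pyGetD pf1 (i-1) 0)

def buildPf1 (a b : List Int) (n : Int) : List Int :=
  (PySem.List.pyRange 1 n 1).foldl (pf1Step a b)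
    (if PySem.List.pyGetD b 0 0 = 1 then
       PySem.List.pySetD (List.replicate n.toNat (0:Int)) 0 (PySem.List.pyGetD a 0 0)
     else List.replicate n.toNat (0:Int))

-- the while loop (fuel only makes the recursion structural; the caller supplies enough fuel)
def loopA (pf pf1 : List Int) (n : Int) : Nat → Int → Int → Int → Int
  | 0, _, _, ans => ans
  | fuel+1, s, e, ans =>
    if e < n then
      let ta : Int := 0
      let ta := if s = 0 then ta + PySem.List.pyGetD pf e 0
                else ta + (PySem.List.pyGetD pf e 0 - PySem.List.pyGetD pf (s-1) 0)
      let ta := if s = 0 then ta + (PySem.List.pyGetD pf1 (n-1) 0 - PySem.List.pyGetD pf1 e 0)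
                else ta + PySem.List.pyGetD pf1 (s-1) 0 + (PySem.List.pyGetD pf1 (n-1) 0 - PySem.List.pyGetD pf1 e 0)
      loopA pf pf1 n fuel (s+1) (e+1) (max ans ta)
    else ans

def solve (a : List Int) (b : List Int) (c : Int) : Int :=
  let n : Int := a.length
  let pf := buildPf a n
  let pf1 := buildPf1 a b n
  loopA pf pf1 n (n - (c-1) + 1).toNat 0 (c-1) 0

-- ===== PORT B =====
def solve_alt (a : List Int) (b : List Int) (c : Int) : Int :=
  let n : Int := a.length
  let condTotal := (PySem.List.pyRange 0 n 1).foldl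
    (fun acc i => if PySem.List.pyGetD b i 0 = 1 then acc + PySem.List.pyGetD a i 0 else acc) 0
  if c > n then 0
  else
    let wswc := (PySem.List.pyRange 0 c 1).foldl
      (fun (p : Int × Int) i =>
        let ws := p.1 + PySem.List.pyGetD a i 0
        let wc := if PySem.List.pyGetD b i 0 = 1 then p.2 + PySem.List.pyGetD a i 0 else p.2
        (ws, wc)) ((0:Int), (0:Int))
    let ans := max 0 (wswc.1 + condTotal - wswc.2)
    let r := (PySem.List.pyRange 1 (n - c + 1) 1).foldl
      (fun (st : Int × Int × Int) s =>
        let e := s + c - 1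
        let ws := st.1 + (PySem.List.pyGetD a e 0 - PySem.List.pyGetD a (s-1) 0)
        let wc := if PySem.List.pyGetD b e 0 = 1 then st.2.1 + PySem.List.pyGetD a e 0 else st.2.1
        let wc := if PySem.List.pyGetD b (s-1) 0 = 1 then wc - PySem.List.pyGetD a (s-1) 0 else wc
        (ws, wc, max st.2.2 (ws + condTotal - wc))) (wswc.1, wswc.2, ans)
    r.2.2

-- ===== PRECONDITION & SPEC =====
-- Pre_ excludes only the inputs on which A RAISES IndexError: empty a (pf[0]=a[0]), b shorter than
-- a (b[i] in the pf1 loop), and EVERY c < 0 — in A's while loop s exceeds e by 1-c ≥ 2, so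
-- pf[s-1] reaches index n (out of range even after Python wraparound) before e reaches n, and for
-- c < 1-len(a) pf[e] is already out of range at the first iteration; A returns on all other inputs.
def Pre_solve (a : List Int) (b : List Int) (c : Int) : Prop :=
  a ≠ [] ∧ a.length ≤ b.length ∧ 0 ≤ c
instance (a : List Int) (b : List Int) (c : Int) : Decidable (Pre_solve a b c) := by
  unfold Pre_solve; infer_instance

def pvWitness_solve : List Int × List Int × Int := ([1, 2, 3], [1, 0, 1], 2)

-- For c = 0 (an empty window) A's pf[-1] wraparound adds the whole-array sum as a candidate, so A
-- returns max(0, sum(a), conditional sum) while B returns the intended empty-window value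
-- max(0, conditional sum); they differ exactly when sum(a) is positive and exceeds that maximum.
def D_solve (a : List Int) (b : List Int) (c : Int) : Prop :=
  c = 0 ∧ 0 < a.sum ∧
    ((List.range a.length).map (fun i => if b.getD i 0 = 1 then a.getD i 0 else 0)).sum < a.sum
instance (a : List Int) (b : List Int) (c : Int) : Decidable (D_solve a b c) := by
  unfold D_solve; infer_instance

def Spec_solve (a : List Int) (b : List Int) (c : Int) (out : Int) : Prop :=
  ¬ D_solve a b c → out = solve_alt a b c
instance (a : List Int) (b : List Int) (c : Int) (out : Int) : Decidable (Spec_solve a b c out) := by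
  unfold Spec_solve; infer_instance

def pvDiffWitness_solve : List Int × List Int × Int := ([3, -1], [0, 0], 0)
def pvDiffWitnessOut_solve : Int × Int := (2, 0)

-- ===== CLAIM (what is proved, stated in full; the proofs are below) =====
def Claim_unchanged_solve : Prop := ∀ (a : List Int) (b : List Int) (c : Int), Dom_solve a b c → Pre_solve a b c → Spec_solve a b c (solve a b c)
def Claim_changed_solve : Prop := Dom_solve (pvDiffWitness_solve.1) (pvDiffWitness_solve.2.1) (pvDiffWitness_solve.2.2) ∧ Pre_solve (pvDiffWitness_solve.1) (pvDiffWitness_solve.2.1) (pvDiffWitness_solve.2.2) ∧ D_solve (pvDiffWitness_solve.1) (pvDiffWitness_solve.2.1) (pvDiffWitness_solve.2.2) ∧ solve (pvDiffWitness_solve.1) (pvDiffWitness_solve.2.1) (pvDiffWitness_solve.2.2) = pvDiffWitnessOut_solve.1 ∧ solve_alt (pvDiffWitness_solve.1) (pvDiffWitness_solve.2.1) (pvDiffWitness_solve.2.2) = pvDiffWitnessOut_solve.2 ∧ pvDiffWitnessOut_solve.1 ≠ pvDiffWitnessOut_solve.2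
def Claim_exact_solve : Prop := ∀ (a : List Int) (b : List Int) (c : Int), Dom_solve a b c → Pre_solve a b c → D_solve a b c → solve a b c ≠ solve_alt a b c

-- ===== LEMMAS AND PROOFS =====

-- prefix sum of the first k elements of a
def SN (a : List Int) (k : Nat) : Int := (a.take k).sum
-- contribution of index i to the conditional sum
def gAB (a b : List Int) (i : Nat) : Int := if b.getD i 0 = 1 then a.getD i 0 else 0
-- conditional prefix sum of the first k indices
def CCN (a b : List Int) (k : Nat) : Int := ((List.range k).map (gAB a b)).sum
-- the candidate value A and B maximise over window starts t
def candT (a b : List Int) (c t : Int) : Int :=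
  SN a (t+c).toNat - SN a t.toNat + CCN a b t.toNat + CCN a b a.length - CCN a b (t+c).toNat

theorem SN_zero (a : List Int) : SN a 0 = 0 := rfl
theorem CCN_zero (a b : List Int) : CCN a b 0 = 0 := rfl

theorem SN_succ (a : List Int) (k : Nat) : SN a (k+1) = SN a k + a.getD k 0 := by
  simp only [SN, List.take_add_one, List.sum_append]
  cases h : a[k]? <;> simp [List.getD, h]

theorem CCN_succ (a b : List Int) (k : Nat) : CCN a b (k+1) = CCN a b k + gAB a b k := by
  simp [CCN, List.range_succ]

theorem getD_set_eq (l : List Int) (n j : Nat) (v : Int) (hn : n < l.length) :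
    (l.set n v).getD j 0 = if j = n then v else l.getD j 0 := by
  simp only [List.getD, List.getElem?_set, hn, if_true]
  rcases eq_or_ne j n with h | h
  · simp [h]
  · simp [h, Ne.symm h]

theorem pfStep_inv (a : List Int) (m : Nat) (hk : m+1 < a.length) (L : List Int)
    (hlen : L.length = a.length) (hget : ∀ j ≤ m, L.getD j 0 = SN a (j+1)) :
    (pfStep a L (1+(m:Int))).length = a.length ∧
    ∀ j ≤ m+1, (pfStep a L (1+(m:Int))).getD j 0 = SN a (j+1) := by
  unfold pfStep
  rw [show ((1:Int)+(m:Int)-1) = ((m:Nat):Int) by ring,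
      show ((1:Int)+(m:Int)) = ((m+1:Nat):Int) by push_cast; ring]
  simp only [PySem.List.pyGetD_natCast, PySem.List.pySetD_natCast]
  constructor
  · simpa using hlen
  · intro j hj
    rw [getD_set_eq _ _ _ _ (by rw [hlen]; omega)]
    split_ifs with h
    · subst h
      rw [hget m le_rfl, SN_succ a (m+1)]
    · exact hget j (by omega)

theorem pf1Step_inv (a b : List Int) (m : Nat) (hk : m+1 < a.length) (L : List Int)
    (hlen : L.length = a.length) (hget : ∀ j ≤ m, L.getD j 0 = CCN a b (j+1)) :
    (pf1Step a b L (1+(m:Int))).length = a.length ∧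
    ∀ j ≤ m+1, (pf1Step a b L (1+(m:Int))).getD j 0 = CCN a b (j+1) := by
  unfold pf1Step
  rw [show ((1:Int)+(m:Int)-1) = ((m:Nat):Int) by ring,
      show ((1:Int)+(m:Int)) = ((m+1:Nat):Int) by push_cast; ring]
  simp only [PySem.List.pyGetD_natCast, PySem.List.pySetD_natCast]
  constructor
  · split_ifs <;> simpa using hlen
  · intro j hj
    split_ifs with h <;> rw [getD_set_eq _ _ _ _ (by rw [hlen]; omega)] <;> split_ifs with h2
    · subst h2
      rw [hget m le_rfl, CCN_succ a b (m+1), gAB, if_pos h]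
    · exact hget j (by omega)
    · subst h2
      rw [hget m le_rfl, CCN_succ a b (m+1), gAB, if_neg h, add_zero]
    · exact hget j (by omega)

theorem buildPf_aux (a : List Int) (k : Nat) (hk : k < a.length) :
    ((PySem.List.pyRange 1 (1+(k:Int)) 1).foldl (pfStep a)
      (PySem.List.pySetD (List.replicate a.length (0:Int)) 0 (PySem.List.pyGetD a 0 0))).length = a.length ∧
    ∀ j : Nat, j ≤ k →
      ((PySem.List.pyRange 1 (1+(k:Int)) 1).foldl (pfStep a)
        (PySem.List.pySetD (List.replicate a.length (0:Int)) 0 (PySem.List.pyGetD a 0 0))).getD j 0 = SN a (j+1) := by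
  induction k with
  | zero =>
    rw [show ((1:Int)+((0:Nat):Int)) = 1 by norm_num, PySem.List.pyRange_one_eq_nil le_rfl]
    simp only [List.foldl_nil]
    rw [PySem.List.pySetD_of_nonneg _ _ le_rfl]
    constructor
    · simp
    · intro j hj
      interval_cases j
      rw [getD_set_eq _ _ _ _ (by simpa using hk)]
      simp [SN_succ, SN_zero, PySem.List.pyGetD_zero, List.getD]
  | succ m ih =>
    obtain ⟨hlen, hget⟩ := ih (by omega)
    rw [show ((1:Int)+((m+1:Nat):Int)) = (1+(m:Int))+1 by push_cast; ring,
        PySem.List.pyRange_one_succ_right (by omega), List.foldl_append]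
    simp only [List.foldl_cons, List.foldl_nil]
    exact pfStep_inv a m hk _ hlen hget
theorem buildPf1_aux (a b : List Int) (k : Nat) (hk : k < a.length) :
    ((PySem.List.pyRange 1 (1+(k:Int)) 1).foldl (pf1Step a b)
      (if PySem.List.pyGetD b 0 0 = 1 then
         PySem.List.pySetD (List.replicate a.length (0:Int)) 0 (PySem.List.pyGetD a 0 0)
       else List.replicate a.length (0:Int))).length = a.length ∧
    ∀ j : Nat, j ≤ k →
      ((PySem.List.pyRange 1 (1+(k:Int)) 1).foldl (pf1Step a b)
        (if PySem.List.pyGetD b 0 0 = 1 then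
           PySem.List.pySetD (List.replicate a.length (0:Int)) 0 (PySem.List.pyGetD a 0 0)
         else List.replicate a.length (0:Int))).getD j 0 = CCN a b (j+1) := by
  induction k with
  | zero =>
    rw [show ((1:Int)+((0:Nat):Int)) = 1 by norm_num, PySem.List.pyRange_one_eq_nil le_rfl]
    simp only [List.foldl_nil]
    constructor
    · split_ifs
      · rw [PySem.List.pySetD_of_nonneg _ _ le_rfl]; simp
      · simp
    · intro j hj
      interval_cases j
      rw [show CCN a b 1 = gAB a b 0 by rw [CCN_succ, CCN_zero, zero_add], gAB]
      simp only [PySem.List.pyGetD_zero] at *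
      split_ifs with h
      · rw [PySem.List.pySetD_of_nonneg _ _ le_rfl, getD_set_eq _ _ _ _ (by simpa using hk)]
        simp
      · simp
  | succ m ih =>
    obtain ⟨hlen, hget⟩ := ih (by omega)
    rw [show ((1:Int)+((m+1:Nat):Int)) = (1+(m:Int))+1 by push_cast; ring,
        PySem.List.pyRange_one_succ_right (by omega), List.foldl_append]
    simp only [List.foldl_cons, List.foldl_nil]
    exact pf1Step_inv a b m hk _ hlen hget
theorem buildPf_spec (a : List Int) (hne : a ≠ []) :
    (buildPf a a.length).length = a.length ∧
    ∀ j : Nat, j < a.length → (buildPf a a.length).getD j 0 = SN a (j+1) := by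
  have h0 : 0 < a.length := List.length_pos_iff.mpr hne
  have haux := buildPf_aux a (a.length - 1) (by omega)
  unfold buildPf
  rw [show ((a.length:Int)).toNat = a.length from Int.toNat_natCast _,
      show ((a.length:Int)) = 1 + ((a.length - 1 : Nat):Int) by omega]
  exact ⟨haux.1, fun j hj => haux.2 j (by omega)⟩

theorem buildPf1_spec (a b : List Int) (hne : a ≠ []) :
    (buildPf1 a b a.length).length = a.length ∧
    ∀ j : Nat, j < a.length → (buildPf1 a b a.length).getD j 0 = CCN a b (j+1) := by
  have h0 : 0 < a.length := List.length_pos_iff.mpr hne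
  have haux := buildPf1_aux a b (a.length - 1) (by omega)
  unfold buildPf1
  rw [show ((a.length:Int)).toNat = a.length from Int.toNat_natCast _,
      show ((a.length:Int)) = 1 + ((a.length - 1 : Nat):Int) by omega]
  exact ⟨haux.1, fun j hj => haux.2 j (by omega)⟩

theorem loopA_spec (a b : List Int) (pf pf1 : List Int) (c : Int) (hc : 1 ≤ c) (hcn : c ≤ (a.length:Int))
    (hpf : ∀ j : Nat, j < a.length → pf.getD j 0 = SN a (j+1))
    (hpf1 : ∀ j : Nat, j < a.length → pf1.getD j 0 = CCN a b (j+1)) :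
    ∀ (fuel : Nat) (s ans : Int), 0 ≤ s → ((a.length:Int) - (s+c-1)).toNat < fuel →
      loopA pf pf1 (a.length:Int) fuel s (s+c-1) ans =
        (PySem.List.pyRange s ((a.length:Int) - c + 1) 1).foldl
          (fun ans t => max ans (candT a b c t)) ans := by
  have hPf : ∀ j : Int, 0 ≤ j → j < (a.length:Int) → PySem.List.pyGetD pf j 0 = SN a (j+1).toNat := by
    intro j h0 h1
    rw [show j = ((j.toNat:Nat):Int) by omega, PySem.List.pyGetD_natCast, hpf j.toNat (by omega)]
    congr 1
  have hPf1 : ∀ j : Int, 0 ≤ j → j < (a.length:Int) → PySem.List.pyGetD pf1 j 0 = CCN a b (j+1).toNat := by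
    intro j h0 h1
    rw [show j = ((j.toNat:Nat):Int) by omega, PySem.List.pyGetD_natCast, hpf1 j.toNat (by omega)]
    congr 1
  intro fuel
  induction fuel with
  | zero => intro s ans hs hf; omega
  | succ f ih =>
    intro s ans hs hf
    by_cases hlt : s + c - 1 < (a.length:Int)
    · rw [loopA, if_pos hlt]
      by_cases hs0 : s = 0
      · subst hs0
        simp only [if_true, zero_add]
        rw [hPf (c-1) (by omega) (by omega), hPf1 ((a.length:Int)-1) (by omega) (by omega),
            hPf1 (c-1) (by omega) (by omega),
            show ((a.length:Int)-1+1).toNat = a.length by omega,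
            show ((c:Int)-1+1).toNat = c.toNat by omega,
            show (c:Int)-1+1 = 1+c-1 by ring]
        rw [ih 1 _ (by omega) (by omega)]
        rw [show PySem.List.pyRange 0 ((a.length:Int) - c + 1) 1 = 0 :: PySem.List.pyRange 1 ((a.length:Int) - c + 1) 1 from PySem.List.pyRange_one_cons (by omega), List.foldl_cons]
        congr 2
        rw [candT]
        simp only [Int.toNat_zero, SN_zero, CCN_zero, zero_add]
        ring
      · simp only [if_neg hs0, zero_add]
        rw [hPf (s+c-1) (by omega) (by omega), hPf (s-1) (by omega) (by omega),
            hPf1 ((a.length:Int)-1) (by omega) (by omega),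
            hPf1 (s+c-1) (by omega) (by omega), hPf1 (s-1) (by omega) (by omega),
            show ((a.length:Int)-1+1).toNat = a.length by omega,
            show (s+c-1+1).toNat = (s+c).toNat by omega,
            show (s-1+1).toNat = s.toNat by omega,
            show s+c-1+1 = (s+1)+c-1 by ring]
        rw [ih (s+1) _ (by omega) (by omega)]
        rw [show PySem.List.pyRange s ((a.length:Int) - c + 1) 1 = s :: PySem.List.pyRange (s+1) ((a.length:Int) - c + 1) 1 from PySem.List.pyRange_one_cons (by omega), List.foldl_cons]
        congr 2
        rw [candT]
        ring
    · rw [loopA, if_neg hlt, PySem.List.pyRange_one_eq_nil (by omega), List.foldl_nil]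

theorem loopA_c0 (a b : List Int) (pf pf1 : List Int)
    (hpf : ∀ j : Nat, j < a.length → pf.getD j 0 = SN a (j+1))
    (hpf1 : ∀ j : Nat, j < a.length → pf1.getD j 0 = CCN a b (j+1)) :
    ∀ (fuel : Nat) (s ans : Int), 1 ≤ s → s ≤ (a.length:Int) → ((a.length:Int) - (s-1)).toNat < fuel →
      loopA pf pf1 (a.length:Int) fuel s (s-1) ans = max ans (CCN a b a.length) := by
  have hPf1 : ∀ j : Int, 0 ≤ j → j < (a.length:Int) → PySem.List.pyGetD pf1 j 0 = CCN a b (j+1).toNat := by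
    intro j h0 h1
    rw [show j = ((j.toNat:Nat):Int) by omega, PySem.List.pyGetD_natCast, hpf1 j.toNat (by omega)]
    congr 1
  intro fuel
  induction fuel with
  | zero => intro s ans hs hsn hf; omega
  | succ f ih =>
    intro s ans hs hsn hf
    rw [loopA, if_pos (by omega : s - 1 < (a.length:Int))]
    simp only [if_neg (by omega : ¬ s = 0)]
    rw [hPf1 ((a.length:Int)-1) (by omega) (by omega), hPf1 (s-1) (by omega) (by omega),
        show ((a.length:Int)-1+1).toNat = a.length by omega]
    have hta : (0:Int) + (PySem.List.pyGetD pf (s-1) 0 - PySem.List.pyGetD pf (s-1) 0) +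
        CCN a b (s-1+1).toNat + (CCN a b a.length - CCN a b (s-1+1).toNat) = CCN a b a.length := by
      ring
    rw [hta]
    by_cases hlast : s + 1 ≤ (a.length:Int)
    · rw [show s-1+1 = (s+1)-1 by ring, ih (s+1) _ (by omega) (by omega) (by omega),
          max_assoc, max_self]
    · obtain ⟨f', rfl⟩ : ∃ f', f = f' + 1 := ⟨f - 1, by omega⟩
      rw [loopA, if_neg (by omega)]

theorem condTotal_spec (a b : List Int) :
    (PySem.List.pyRange 0 (a.length:Int) 1).foldl
      (fun acc i => if PySem.List.pyGetD b i 0 = 1 then acc + PySem.List.pyGetD a i 0 else acc) 0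
    = CCN a b a.length := by
  induction a.length with
  | zero => simp [PySem.List.pyRange_one_eq_nil, CCN_zero]
  | succ m ih =>
    rw [show ((m+1:Nat):Int) = (m:Int)+1 by push_cast; ring,
        PySem.List.pyRange_one_succ_right (by positivity), List.foldl_append, ih, CCN_succ]
    simp only [List.foldl_cons, List.foldl_nil, gAB, PySem.List.pyGetD_natCast]
    split_ifs <;> simp

theorem initW_spec (a b : List Int) (k : Nat) :
    (PySem.List.pyRange 0 (k:Int) 1).foldl
      (fun (p : Int × Int) i =>
        let ws := p.1 + PySem.List.pyGetD a i 0
        let wc := if PySem.List.pyGetD b i 0 = 1 then p.2 + PySem.List.pyGetD a i 0 else p.2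
        (ws, wc)) ((0:Int), (0:Int)) = (SN a k, CCN a b k) := by
  induction k with
  | zero => simp [PySem.List.pyRange_one_eq_nil, SN_zero, CCN_zero]
  | succ m ih =>
    rw [show ((m+1:Nat):Int) = (m:Int)+1 by omega,
        PySem.List.pyRange_one_succ_right (by positivity), List.foldl_append, ih]
    simp only [List.foldl_cons, List.foldl_nil, PySem.List.pyGetD_natCast]
    rw [SN_succ, CCN_succ]
    simp only [gAB]
    split_ifs <;> simp

theorem foldB_inv (a b : List Int) (c : Int) (c' : Nat) (hc : c = (c' : Int)) (A0 : Int) (m : Nat) :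
    (PySem.List.pyRange 1 (1+(m:Int)) 1).foldl
      (fun (st : Int × Int × Int) s =>
        let e := s + c - 1
        let ws := st.1 + (PySem.List.pyGetD a e 0 - PySem.List.pyGetD a (s-1) 0)
        let wc := if PySem.List.pyGetD b e 0 = 1 then st.2.1 + PySem.List.pyGetD a e 0 else st.2.1
        let wc := if PySem.List.pyGetD b (s-1) 0 = 1 then wc - PySem.List.pyGetD a (s-1) 0 else wc
        (ws, wc, max st.2.2 (ws + CCN a b a.length - wc))) (SN a c', CCN a b c', A0)
    = (SN a (m+c') - SN a m, CCN a b (m+c') - CCN a b m,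
       (PySem.List.pyRange 1 (1+(m:Int)) 1).foldl (fun ans t => max ans (candT a b c t)) A0) := by
  induction m with
  | zero => simp [PySem.List.pyRange_one_eq_nil, SN_zero, CCN_zero]
  | succ m ih =>
    rw [show (1+((m+1:Nat):Int)) = (1+(m:Int))+1 by push_cast; ring,
        PySem.List.pyRange_one_succ_right (by omega), List.foldl_append, ih, List.foldl_append]
    simp only [List.foldl_cons, List.foldl_nil]
    subst hc
    rw [show (1+(m:Int)+(c':Int)-1) = ((m+c' : Nat):Int) by push_cast; ring,
        show (1+(m:Int)-1) = ((m:Nat):Int) by push_cast; ring]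
    simp only [PySem.List.pyGetD_natCast]
    have h1 : ((1:Int)+(m:Int)+(c':Int)).toNat = m+1+c' := by omega
    have h2 : ((1:Int)+(m:Int)).toNat = m+1 := by omega
    simp only [candT, h1, h2]
    have e1 : SN a (m+1+c') = SN a (m+c') + a.getD (m+c') 0 := by
      rw [show m+1+c' = (m+c')+1 by omega]; exact SN_succ a (m+c')
    have e2 : CCN a b (m+1+c') = CCN a b (m+c') + gAB a b (m+c') := by
      rw [show m+1+c' = (m+c')+1 by omega]; exact CCN_succ a b (m+c')
    have e3 : SN a (m+1) = SN a m + a.getD m 0 := SN_succ a m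
    have e4 : CCN a b (m+1) = CCN a b m + gAB a b m := CCN_succ a b m
    rw [e1, e2, e3, e4]
    simp only [gAB]
    split_ifs <;> simp only [Prod.mk.injEq] <;>
      refine ⟨by ring, by ring, ?_⟩ <;> (congr 1 <;> ring)


theorem foldl_max_const (l : List Int) (x v : Int) (h : v ≤ x) :
    l.foldl (fun ans _t => max ans v) x = x := by
  induction l generalizing x with
  | nil => rfl
  | cons y t iht => simp only [List.foldl_cons]; rw [max_eq_left h]; exact iht x h

theorem solve_closed (a b : List Int) (c : Int) (hne : a ≠ []) (hb : a.length ≤ b.length) (hc : 1 ≤ c) (hcn : c ≤ (a.length:Int)) :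
    solve a b c = (PySem.List.pyRange 0 ((a.length:Int) - c + 1) 1).foldl
      (fun ans t => max ans (candT a b c t)) 0 := by
  obtain ⟨hl, hget⟩ := buildPf_spec a hne
  obtain ⟨hl1, hget1⟩ := buildPf1_spec a b hne
  show loopA (buildPf a (a.length:Int)) (buildPf1 a b (a.length:Int)) (a.length:Int)
      (((a.length:Int) - (c-1) + 1).toNat) 0 (c-1) 0 = _
  rw [show (c:Int)-1 = 0+c-1 by ring]
  exact loopA_spec a b _ _ c hc hcn hget hget1 _ 0 0 le_rfl (by omega)

theorem solve_alt_closed (a b : List Int) (c : Int) (hc : 0 ≤ c) (hcn : c ≤ (a.length:Int)) :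
    solve_alt a b c = (PySem.List.pyRange 0 ((a.length:Int) - c + 1) 1).foldl
      (fun ans t => max ans (candT a b c t)) 0 := by
  simp only [solve_alt]
  rw [if_neg (by omega : ¬ c > (a.length:Int)), condTotal_spec]
  rw [show (c:Int) = ((c.toNat:Nat):Int) by omega]
  rw [initW_spec a b c.toNat]
  rw [show (a.length:Int) - ((c.toNat:Nat):Int) + 1 = 1 + (((a.length - c.toNat : Nat)):Int) by omega]
  rw [foldB_inv a b ((c.toNat:Nat):Int) c.toNat rfl _ (a.length - c.toNat)]
  rw [show PySem.List.pyRange 0 (1 + (((a.length - c.toNat : Nat)):Int)) 1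
        = 0 :: PySem.List.pyRange 1 (1 + (((a.length - c.toNat : Nat)):Int)) 1
      from PySem.List.pyRange_one_cons (by omega), List.foldl_cons]
  congr 1
  rw [candT]
  simp only [zero_add, Int.toNat_zero, Int.toNat_natCast, SN_zero, CCN_zero]
  congr 1
  ring

theorem solve_zero (a b : List Int) (c : Int) (hne : a ≠ []) (hc : c = 0) :
    solve a b c = max (max 0 (SN a a.length)) (CCN a b a.length) := by
  subst hc
  have h0 : 0 < a.length := List.length_pos_iff.mpr hne
  obtain ⟨hl, hget⟩ := buildPf_spec a hne
  obtain ⟨hl1, hget1⟩ := buildPf1_spec a b hne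
  have hpfne : buildPf a (a.length:Int) ≠ [] := List.ne_nil_of_length_pos (by omega)
  have hpf1ne : buildPf1 a b (a.length:Int) ≠ [] := List.ne_nil_of_length_pos (by omega)
  show loopA (buildPf a (a.length:Int)) (buildPf1 a b (a.length:Int)) (a.length:Int)
      (((a.length:Int) - ((0:Int)-1) + 1).toNat) 0 ((0:Int)-1) 0 = _
  rw [show (((a.length:Int) - ((0:Int)-1) + 1)).toNat = (a.length + 1) + 1 by omega]
  rw [loopA, if_pos (by omega : (0:Int)-1 < (a.length:Int))]
  simp only [if_true, zero_add]
  rw [show (0:Int)-1 = -1 by ring,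
      PySem.List.pyGetD_neg_one _ 0 hpfne, PySem.List.pyGetD_neg_one _ 0 hpf1ne]
  have hg1 : (buildPf a (a.length:Int)).getLast hpfne = SN a a.length := by
    rw [List.getLast_eq_getElem, ← List.getD_eq_getElem _ 0 (by omega), hl,
        hget (a.length - 1) (by omega)]
    congr 1
    omega
  have hg2 : (buildPf1 a b (a.length:Int)).getLast hpf1ne = CCN a b a.length := by
    rw [List.getLast_eq_getElem, ← List.getD_eq_getElem _ 0 (by omega), hl1,
        hget1 (a.length - 1) (by omega)]
    congr 1
    omega
  have hg3 : PySem.List.pyGetD (buildPf1 a b (a.length:Int)) ((a.length:Int)-1) 0 = CCN a b a.length := by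
    rw [show ((a.length:Int)-1) = (((a.length - 1 : Nat)):Int) by omega, PySem.List.pyGetD_natCast,
        hget1 (a.length - 1) (by omega)]
    congr 1
    omega
  rw [hg1, hg2, hg3]
  rw [show (-1:Int)+1 = 1-1 by ring]
  rw [loopA_c0 a b _ _ hget hget1 (a.length+1) 1 _ (by omega) (by omega) (by omega)]
  simp [sub_self]

theorem solve_alt_zero (a b : List Int) (c : Int) (hne : a ≠ []) (hc : c = 0) :
    solve_alt a b c = max 0 (CCN a b a.length) := by
  have hcand : ∀ t : Int, candT a b 0 t = CCN a b a.length := by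
    intro t
    rw [candT, show t+(0:Int) = t from add_zero t]
    ring
  rw [solve_alt_closed a b c (by omega) (by omega), hc]
  rw [show (a.length:Int) - 0 + 1 = (a.length:Int) + 1 by ring]
  rw [show PySem.List.pyRange 0 ((a.length:Int) + 1) 1
        = 0 :: PySem.List.pyRange 1 ((a.length:Int) + 1) 1
      from PySem.List.pyRange_one_cons (by omega), List.foldl_cons, hcand 0]
  refine (PySem.List.foldl_congr_mem _ _
      (fun (ans : Int) (_t : Int) => max ans (CCN a b a.length)) _ ?_).trans
      (foldl_max_const _ _ _ (le_max_right 0 _))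
  intro acc x _
  rw [hcand x]

theorem solve_big (a b : List Int) (c : Int) (hc : (a.length:Int) < c) : solve a b c = 0 := by
  show loopA (buildPf a a.length) (buildPf1 a b a.length) (a.length:Int) ((a.length:Int) - (c-1) + 1).toNat 0 (c-1) 0 = 0
  rcases Nat.eq_zero_or_pos (((a.length:Int)) - (c-1) + 1).toNat with h | h
  · rw [h]; rfl
  · obtain ⟨f, hf⟩ : ∃ f, ((a.length:Int) - (c-1) + 1).toNat = f + 1 := ⟨_, (Nat.succ_pred_eq_of_pos h).symm⟩
    rw [hf, loopA, if_neg (by omega)]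

theorem solve_alt_big (a b : List Int) (c : Int) (hc : (a.length:Int) < c) : solve_alt a b c = 0 := by
  unfold solve_alt
  rw [if_pos (by omega)]

-- ===== VERDICT (by name: the statement is the Claim_ definition above) =====
theorem solve_spec : Claim_unchanged_solve := by
  intro a b c hdom hpre
  obtain ⟨hne, hb, hc0⟩ := hpre
  unfold Spec_solve
  intro hnd
  unfold D_solve at hnd
  have h0 : 0 < a.length := List.length_pos_iff.mpr hne
  by_cases hbig : (a.length:Int) < c
  · rw [solve_big a b c hbig, solve_alt_big a b c hbig]
  · by_cases hz : c = 0
    · rw [solve_zero a b c hne hz, solve_alt_zero a b c hne hz]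
      have hS : SN a a.length = a.sum := by simp [SN]
      have hCC : CCN a b a.length
          = ((List.range a.length).map (fun i => if b.getD i 0 = 1 then a.getD i 0 else 0)).sum := rfl
      have hD : ¬ (0 < a.sum ∧
          ((List.range a.length).map (fun i => if b.getD i 0 = 1 then a.getD i 0 else 0)).sum < a.sum) := by
        intro hcon
        exact hnd ⟨hz, hcon.1, hcon.2⟩
      rw [hS, hCC]
      omega
    · rw [solve_closed a b c hne hb (by omega) (by omega),
          solve_alt_closed a b c (by omega) (by omega)]

theorem solve_changed : Claim_changed_solve := by
  unfold Claim_changed_solve; decide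

theorem solve_tight : Claim_exact_solve := by
  intro a b c hdom hpre hd
  obtain ⟨hne, hb, hc0⟩ := hpre
  unfold D_solve at hd
  obtain ⟨hz, hpos, hlt⟩ := hd
  rw [solve_zero a b c hne hz, solve_alt_zero a b c hne hz]
  have hS : SN a a.length = a.sum := by simp [SN]
  have hCC : CCN a b a.length
      = ((List.range a.length).map (fun i => if b.getD i 0 = 1 then a.getD i 0 else 0)).sum := rfl
  rw [hS, hCC]
  omega
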